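-- pv_equiv track=rewrite | github.com/Victorique-123/Parallel-version-of-Dummer-s-algorithm-implemented | ptau.py | get_P_tau
-- ===== SOURCE A (Python) =====
-- from scipy.special import comb
-- from math import comb
--
-- def get_P_tau(n, t):
--     p_and_tau = []
--     for tau_p in range(t):
--       for p in range(n-1):
--         if (comb(p+1,(tau_p+1))>comb(n-p-1,t-(tau_p+1))) and (comb(p,tau_p)<=comb(n-p,t-tau_p)):
--           p_and_tau.append((p,tau_p))
--     p_and_tau=list(set(p_and_tau))
--     return p_and_tau
-- ===== SOURCE B (Python) =====
-- from math import comb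
--
-- def _least(pred, a, b):
--     # least m in [a, b) with pred(m), or b if none (pred monotone false->true)
--     while a < b:
--         m = (a + b) // 2
--         if pred(m):
--             b = m
--         else:
--             a = m + 1
--     return a
--
-- def get_P_tau(n, t):
--     pairs = []
--     for tau_p in range(t):
--         # comb(p+1, tau_p+1) grows with p while comb(n-p-1, t-tau_p-1) shrinks,
--         # so each condition flips at most once: the valid p form one interval.
--         lo = _least(lambda m: comb(m + 1, tau_p + 1) > comb(n - m - 1, t - tau_p - 1), 0, n - 1)
--         hi = _least(lambda m: not (comb(m, tau_p) <= comb(n - m, t - tau_p)), lo, n - 1)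
--         for p in range(lo, hi):
--             pairs.append((p, tau_p))
--     return list(set(pairs))
-- ===== Notes on version B (the rewrite author's own statement) =====
-- stated objective: faster
-- what changed: Instead of testing every p for every tau_p, B exploits that both binomial conditions are monotone in p, so the valid p form one interval per tau_p whose two endpoints are found by binary search.
import Mathlib
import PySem

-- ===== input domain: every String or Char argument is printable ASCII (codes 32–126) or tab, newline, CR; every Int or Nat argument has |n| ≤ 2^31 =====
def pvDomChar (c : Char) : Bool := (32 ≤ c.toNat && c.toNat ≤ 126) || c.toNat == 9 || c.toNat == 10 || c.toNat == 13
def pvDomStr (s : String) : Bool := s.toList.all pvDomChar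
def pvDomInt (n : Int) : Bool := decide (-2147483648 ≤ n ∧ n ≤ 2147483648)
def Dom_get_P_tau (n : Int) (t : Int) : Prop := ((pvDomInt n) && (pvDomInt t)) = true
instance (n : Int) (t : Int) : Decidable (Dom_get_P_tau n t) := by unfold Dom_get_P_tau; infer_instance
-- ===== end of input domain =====

-- B replaces A's scan over all p for every tau_p by two binary searches for the endpoints of the
-- (monotone) valid-p interval; objective: faster (fewer comb evaluations per tau_p).

-- ===== PORT A =====
-- math.comb: exact here — every comb call A makes has both arguments ≥ 0 (0 ≤ tau_p < t, 0 ≤ p < n-1)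
def pyComb (a b : Int) : Int := (Nat.choose a.toNat b.toNat : Int)

def get_P_tau (n : Int) (t : Int) : List (Int × Int) :=
  let p_and_tau : List (Int × Int) :=
    (PySem.List.pyRange 0 t 1).foldl (fun acc tau_p =>
      (PySem.List.pyRange 0 (n-1) 1).foldl (fun acc p =>
        if pyComb (p+1) (tau_p+1) > pyComb (n-p-1) (t-(tau_p+1)) ∧
           pyComb p tau_p ≤ pyComb (n-p) (t-tau_p)
        then acc ++ [(p, tau_p)] else acc) acc) []
  PySem.Set.ofList p_and_tau          -- list(set(p_and_tau))

-- ===== PORT B =====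
-- _least(pred, a, b): least m in [a,b) with pred(m), or b if none (pred monotone false→true)
def leastSearch (pred : Int → Bool) (a b : Int) : Int :=
  if h : a < b then
    let m := PySem.Int.floordiv (a + b) 2
    if pred m then leastSearch pred a m else leastSearch pred (m+1) b
  else a
termination_by (b - a).toNat
decreasing_by
  all_goals
    have hm : a ≤ PySem.Int.floordiv (a + b) 2 ∧ PySem.Int.floordiv (a + b) 2 < b := by
      rw [PySem.Int.floordiv_eq_ediv_of_pos (by norm_num)]; omega
  · omega
  · omega

def get_P_tau_alt (n : Int) (t : Int) : List (Int × Int) :=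
  let pairs : List (Int × Int) :=
    (PySem.List.pyRange 0 t 1).foldl (fun acc tau_p =>
      let lo := leastSearch
        (fun m => decide (pyComb (m+1) (tau_p+1) > pyComb (n-m-1) (t-tau_p-1))) 0 (n-1)
      let hi := leastSearch
        (fun m => !decide (pyComb m tau_p ≤ pyComb (n-m) (t-tau_p))) lo (n-1)
      (PySem.List.pyRange lo hi 1).foldl (fun acc p => acc ++ [(p, tau_p)]) acc) []
  PySem.Set.ofList pairs              -- list(set(pairs))

-- ===== PRECONDITION & SPEC =====
def Spec_get_P_tau (n : Int) (t : Int) (out : List (Int × Int)) : Prop := out = get_P_tau_alt n t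
instance (n : Int) (t : Int) (out : List (Int × Int)) : Decidable (Spec_get_P_tau n t out) := by unfold Spec_get_P_tau; infer_instance

-- ===== CLAIM (what is proved, stated in full; the proofs are below) =====
def Claim_equal_get_P_tau : Prop := ∀ (n : Int) (t : Int), Dom_get_P_tau n t → Spec_get_P_tau n t (get_P_tau n t)

-- ===== LEMMAS AND PROOFS =====

theorem pyComb_mono_left (a a' b : Int) (h : a ≤ a') : pyComb a b ≤ pyComb a' b := by
  simpa [pyComb] using Nat.cast_le.mpr (Nat.choose_le_choose _ (Int.toNat_le_toNat h))

theorem leastSearch_of_not_lt (pred : Int → Bool) (a b : Int) (h : ¬ a < b) :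
    leastSearch pred a b = a := by
  rw [leastSearch]; simp [h]

theorem leastSearch_spec (pred : Int → Bool)
    (mono : ∀ p q : Int, p ≤ q → pred p = true → pred q = true) (a b : Int) :
    a ≤ leastSearch pred a b ∧
    (∀ p, a ≤ p → p < leastSearch pred a b → pred p = false) ∧
    (a ≤ b → leastSearch pred a b ≤ b) ∧
    (∀ p, leastSearch pred a b ≤ p → p < b → pred p = true) := by
  suffices H : ∀ (k : Nat) (a b : Int), (b - a).toNat ≤ k →
      a ≤ leastSearch pred a b ∧
      (∀ p, a ≤ p → p < leastSearch pred a b → pred p = false) ∧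
      (a ≤ b → leastSearch pred a b ≤ b) ∧
      (∀ p, leastSearch pred a b ≤ p → p < b → pred p = true) from H (b - a).toNat a b le_rfl
  intro k
  induction k with
  | zero =>
    intro a b hk
    have h : ¬ a < b := by omega
    rw [leastSearch_of_not_lt pred a b h]
    exact ⟨le_rfl, fun p h1 h2 => absurd h2 (by omega), fun _ => by omega,
           fun p h1 h2 => absurd h2 (by omega)⟩
  | succ k ih =>
    intro a b hk
    by_cases h : a < b
    · have hmb : a ≤ PySem.Int.floordiv (a + b) 2 ∧ PySem.Int.floordiv (a + b) 2 < b := by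
        rw [PySem.Int.floordiv_eq_ediv_of_pos (by norm_num)]; omega
      rw [leastSearch]
      simp only [dif_pos h]
      set m := PySem.Int.floordiv (a + b) 2 with hmdef
      by_cases hp : pred m = true
      · rw [if_pos hp]
        obtain ⟨h1, h2, h3, h4⟩ := ih a m (by omega)
        refine ⟨h1, h2, fun _ => by have := h3 (by omega); omega, fun p hp1 hp2 => ?_⟩
        by_cases hpm : p < m
        · exact h4 p hp1 hpm
        · exact mono m p (by omega) hp
      · rw [if_neg hp]
        obtain ⟨h1, h2, h3, h4⟩ := ih (m + 1) b (by omega)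
        refine ⟨by omega, fun p hp1 hp2 => ?_, fun _ => h3 (by omega), h4⟩
        by_cases hpm : p ≤ m
        · cases hq : pred p
          · rfl
          · exact absurd (mono p m hpm hq) hp
        · exact h2 p (by omega) hp2
    · exact ih a b (by omega)

theorem filter_pyRange_eq_pyRange (pred : Int → Bool) (a b lo hi : Int)
    (h1 : a ≤ lo) (h2 : lo ≤ hi) (h3 : hi ≤ b)
    (hp : ∀ p, a ≤ p → p < b → (pred p = true ↔ (lo ≤ p ∧ p < hi))) :
    (PySem.List.pyRange a b 1).filter pred = PySem.List.pyRange lo hi 1 := by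
  rw [PySem.List.pyRange_one_append a lo b h1 (le_trans h2 h3),
      PySem.List.pyRange_one_append lo hi b h2 h3,
      List.filter_append, List.filter_append]
  have e1 : (PySem.List.pyRange a lo 1).filter pred = [] := by
    rw [List.filter_eq_nil_iff]
    intro p hpmem
    obtain ⟨hpa, hpb⟩ := PySem.List.mem_pyRange_one.mp hpmem
    simp only [Bool.not_eq_true]
    cases hq : pred p
    · rfl
    · exact absurd ((hp p hpa (by omega)).mp hq).1 (by omega)
  have e2 : (PySem.List.pyRange lo hi 1).filter pred = PySem.List.pyRange lo hi 1 := by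
    rw [List.filter_eq_self]
    intro p hpmem
    obtain ⟨hpa, hpb⟩ := PySem.List.mem_pyRange_one.mp hpmem
    exact (hp p (by omega) (by omega)).mpr ⟨hpa, hpb⟩
  have e3 : (PySem.List.pyRange hi b 1).filter pred = [] := by
    rw [List.filter_eq_nil_iff]
    intro p hpmem
    obtain ⟨hpa, hpb⟩ := PySem.List.mem_pyRange_one.mp hpmem
    simp only [Bool.not_eq_true]
    cases hq : pred p
    · rfl
    · exact absurd ((hp p (by omega) hpb).mp hq).2 (by omega)
  rw [e1, e2, e3]
  simp

theorem inner_eq (n t tau_p : Int) :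
    (PySem.List.pyRange 0 (n-1) 1).filter
      (fun p => decide (pyComb (p+1) (tau_p+1) > pyComb (n-p-1) (t-(tau_p+1)) ∧
                        pyComb p tau_p ≤ pyComb (n-p) (t-tau_p))) =
    PySem.List.pyRange
      (leastSearch (fun m => decide (pyComb (m+1) (tau_p+1) > pyComb (n-m-1) (t-tau_p-1))) 0 (n-1))
      (leastSearch (fun m => !decide (pyComb m tau_p ≤ pyComb (n-m) (t-tau_p)))
        (leastSearch (fun m => decide (pyComb (m+1) (tau_p+1) > pyComb (n-m-1) (t-tau_p-1))) 0 (n-1)) (n-1))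
      1 := by
  set pred1 : Int → Bool :=
    fun m => decide (pyComb (m+1) (tau_p+1) > pyComb (n-m-1) (t-tau_p-1)) with hpred1
  set pred2 : Int → Bool :=
    fun m => !decide (pyComb m tau_p ≤ pyComb (n-m) (t-tau_p)) with hpred2
  have mono1 : ∀ p q : Int, p ≤ q → pred1 p = true → pred1 q = true := by
    intro p q hpq
    simp only [hpred1, decide_eq_true_iff]
    intro hp
    have hA := pyComb_mono_left (p+1) (q+1) (tau_p+1) (by omega)
    have hB := pyComb_mono_left (n-q-1) (n-p-1) (t-tau_p-1) (by omega)
    omega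
  have mono2 : ∀ p q : Int, p ≤ q → pred2 p = true → pred2 q = true := by
    intro p q hpq
    simp only [hpred2, Bool.not_eq_eq_eq_not, Bool.not_true, decide_eq_false_iff_not, not_le]
    intro hp
    have hA := pyComb_mono_left p q tau_p hpq
    have hB := pyComb_mono_left (n-q) (n-p) (t-tau_p) (by omega)
    omega
  set lo := leastSearch pred1 0 (n-1) with hlodef
  set hi := leastSearch pred2 lo (n-1) with hhidef
  obtain ⟨hlo1, hlo2, hlo3, hlo4⟩ := leastSearch_spec pred1 mono1 0 (n-1)
  obtain ⟨hhi1, hhi2, hhi3, hhi4⟩ := leastSearch_spec pred2 mono2 lo (n-1)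
  by_cases hn : n - 1 ≤ 0
  · have hlo0 : lo = 0 := leastSearch_of_not_lt pred1 0 (n-1) (by omega)
    have hhi0 : hi = 0 := by
      rw [hhidef, hlo0]
      exact leastSearch_of_not_lt pred2 0 (n-1) (by omega)
    rw [PySem.List.pyRange_one_eq_nil hn, hlo0, hhi0, PySem.List.pyRange_one_eq_nil le_rfl]
    rfl
  · apply filter_pyRange_eq_pyRange _ 0 (n-1) lo hi hlo1 hhi1 (hhi3 (hlo3 (by omega)))
    intro p hp0 hpn
    have harg : t - (tau_p + 1) = t - tau_p - 1 := by ring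
    simp only [harg, decide_eq_true_iff]
    constructor
    · rintro ⟨hc1, hc2⟩
      constructor
      · by_contra hx
        push Not at hx
        have hfalse := hlo2 p hp0 hx
        rw [hpred1] at hfalse
        simp only [decide_eq_false_iff_not] at hfalse
        exact hfalse hc1
      · by_contra hx
        push Not at hx
        have htrue := hhi4 p hx hpn
        rw [hpred2] at htrue
        simp only [Bool.not_eq_eq_eq_not, Bool.not_true, decide_eq_false_iff_not] at htrue
        exact htrue hc2
    · rintro ⟨hplo, hphi⟩
      constructor
      · have htrue := hlo4 p hplo hpn
        rw [hpred1] at htrue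
        simpa only [decide_eq_true_iff] using htrue
      · have hfalse := hhi2 p hplo hphi
        rw [hpred2] at hfalse
        simpa only [Bool.not_eq_eq_eq_not, Bool.not_false, decide_eq_true_iff] using hfalse

-- ===== VERDICT (by name: the statement is the Claim_ definition above) =====
theorem get_P_tau_spec : Claim_equal_get_P_tau := by
  intro n t _
  unfold Spec_get_P_tau get_P_tau get_P_tau_alt
  refine congrArg PySem.Set.ofList ?_
  refine PySem.List.foldl_congr_mem _ _ _ _ (fun acc tau_p _ => ?_)
  rw [PySem.List.foldl_append_ite
        (fun p => pyComb (p+1) (tau_p+1) > pyComb (n-p-1) (t-(tau_p+1)) ∧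
                  pyComb p tau_p ≤ pyComb (n-p) (t-tau_p)) (fun p => (p, tau_p)),
      PySem.List.foldl_append_singleton_eq_map, inner_eq]
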